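-- pv_equiv track=rewrite | github.com/gjorgjinac/SciFoodNER | scifoodner_final/utils_error_analysis.py | word_id_gen
-- ===== SOURCE A (Python) =====
-- def word_id_gen(sentence_ids):
--     current_val = None
--     current_index = -1
--     new_l = []
--     for x in sentence_ids:
--         if x != current_val:
--             current_index = -1
--             current_val = x
--         current_index+=1
--         new_l.append(current_index)
--     return new_l
-- ===== SOURCE B (Python) =====
-- def word_id_gen(sentence_ids):
--     # Two-phase run decomposition: find each maximal run of equal ids, emit range(run length).
--     result = []
--     i = 0
--     n = len(sentence_ids)
--     while i < n:
--         j = i + 1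
--         while j < n and sentence_ids[j] == sentence_ids[i]:
--             j += 1
--         result.extend(range(j - i))
--         i = j
--     return result
-- ===== Notes on version B (the rewrite author's own statement) =====
-- stated objective: alternative
-- what changed: Replaces the single running-state loop (current_val/current_index reset-and-increment) with a two-phase decomposition: scan each maximal run of consecutive equal sentence ids and extend the output with range(run length).
import Mathlib
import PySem

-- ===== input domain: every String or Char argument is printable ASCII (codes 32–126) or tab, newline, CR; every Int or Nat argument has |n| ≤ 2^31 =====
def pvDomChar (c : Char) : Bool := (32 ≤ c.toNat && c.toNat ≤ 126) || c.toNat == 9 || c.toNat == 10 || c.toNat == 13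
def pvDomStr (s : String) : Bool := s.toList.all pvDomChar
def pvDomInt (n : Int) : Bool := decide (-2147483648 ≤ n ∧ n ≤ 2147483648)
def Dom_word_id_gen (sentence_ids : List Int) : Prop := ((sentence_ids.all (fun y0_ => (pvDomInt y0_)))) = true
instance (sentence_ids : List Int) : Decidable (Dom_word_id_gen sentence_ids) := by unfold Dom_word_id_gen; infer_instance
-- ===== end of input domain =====

-- B replaces A's running-state loop by a run-splitting decomposition (maximal runs of equal ids, then range per run); same cost, alternative structure.


-- ===== PORT A =====
-- A's loop body: reset (current_val, current_index) on change, then increment and append.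
def stepA (s : Option Int × Int × List Int) (x : Int) : Option Int × Int × List Int :=
  let cs := if some x ≠ s.1 then (some x, (-1 : Int)) else (s.1, s.2.1)
  (cs.1, cs.2 + 1, s.2.2 ++ [cs.2 + 1])

def word_id_gen (sentence_ids : List Int) : List Int :=
  (sentence_ids.foldl stepA (none, -1, [])).2.2

-- ===== PORT B =====
-- inner while: the run of elements equal to the head; outer while: emit range(run length), continue after the run
def wordIdRuns : List Int → List Int
  | [] => []
  | x :: rest =>
    (List.range ((rest.takeWhile (fun y => y == x)).length + 1)).map (fun k : Nat => (k : Int))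
      ++ wordIdRuns (rest.dropWhile (fun y => y == x))
termination_by xs => xs.length
decreasing_by
  simpa using Nat.lt_succ_of_le (List.length_dropWhile_le _ _)

def word_id_gen_alt (sentence_ids : List Int) : List Int := wordIdRuns sentence_ids

-- ===== PRECONDITION & SPEC =====
def Spec_word_id_gen (sentence_ids : List Int) (out : List Int) : Prop := out = word_id_gen_alt sentence_ids
instance (sentence_ids : List Int) (out : List Int) : Decidable (Spec_word_id_gen sentence_ids out) := by unfold Spec_word_id_gen; infer_instance

-- ===== CLAIM (what is proved, stated in full; the proofs are below) =====
def Claim_equal_word_id_gen : Prop := ∀ (sentence_ids : List Int), Dom_word_id_gen sentence_ids → Spec_word_id_gen sentence_ids (word_id_gen sentence_ids)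

-- ===== LEMMAS AND PROOFS =====

-- mid-level recursive description of A's loop output
def gRun (c : Option Int) (i : Int) : List Int → List Int
  | [] => []
  | x :: xs => if some x ≠ c then 0 :: gRun (some x) 0 xs else (i + 1) :: gRun c (i + 1) xs

lemma foldA_eq_gRun (xs : List Int) : ∀ (c : Option Int) (i : Int) (acc : List Int),
    (xs.foldl stepA (c, i, acc)).2.2 = acc ++ gRun c i xs := by
  induction xs with
  | nil => intro c i acc; simp [gRun]
  | cons x xs ih =>
    intro c i acc
    by_cases h : some x = c
    · have hstep : stepA (c, i, acc) x = (c, i + 1, acc ++ [i + 1]) := by simp [stepA, h]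
      rw [List.foldl_cons, hstep, ih]
      simp [gRun, h]
    · have hstep : stepA (c, i, acc) x = (some x, 0, acc ++ [0]) := by
        simp [stepA, h]
      rw [List.foldl_cons, hstep, ih]
      simp [gRun, h]

lemma range_map_shift (n : Nat) (i : Int) :
    (List.range (n + 1)).map (fun k : Nat => i + (k : Int)) =
      i :: (List.range n).map (fun k : Nat => i + 1 + (k : Int)) := by
  rw [List.range_succ_eq_map, List.map_cons, List.map_map]
  congr 1
  · simp
  · apply List.map_congr_left
    intro k _
    simp [Function.comp]
    ring

lemma map_cast_eq_zero_add (m : Nat) :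
    (List.range m).map (fun k : Nat => (k : Int)) = (List.range m).map (fun k : Nat => (0 : Int) + (k : Int)) := by
  apply List.map_congr_left
  intro k _
  ring

lemma gRun_run (n : Nat) : ∀ (xs : List Int), xs.length ≤ n → ∀ (x : Int) (i : Int),
    gRun (some x) i xs =
      (List.range ((xs.takeWhile (fun y => y == x)).length)).map (fun k : Nat => i + 1 + (k : Int))
        ++ wordIdRuns (xs.dropWhile (fun y => y == x)) := by
  induction n with
  | zero =>
    intro xs hxs x i
    have : xs = [] := List.eq_nil_of_length_eq_zero (Nat.le_zero.mp hxs)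
    simp [this, gRun, wordIdRuns]
  | succ n ih =>
    intro xs hxs x i
    cases xs with
    | nil => simp [gRun, wordIdRuns]
    | cons y ys =>
      have hlen : ys.length ≤ n := Nat.lt_succ_iff.mp (by simpa using hxs)
      by_cases h : y = x
      · subst h
        have hb : ((y == y) = true) := by simp
        simp only [List.takeWhile_cons, List.dropWhile_cons, hb, if_true]
        have hg : gRun (some y) i (y :: ys) = (i + 1) :: gRun (some y) (i + 1) ys := by
          simp [gRun]
        rw [hg, ih ys hlen y (i + 1), List.length_cons, range_map_shift, List.cons_append]
      · have hb : ¬ ((y == x) = true) := by simp [h]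
        simp only [List.takeWhile_cons, List.dropWhile_cons, hb, Bool.false_eq_true, if_false]
        have hg : gRun (some x) i (y :: ys) = 0 :: gRun (some y) 0 ys := by
          simp [gRun, h]
        have hw : wordIdRuns (y :: ys) =
            (List.range (((ys.takeWhile (fun z => z == y)).length) + 1)).map (fun k : Nat => (k : Int))
              ++ wordIdRuns (ys.dropWhile (fun z => z == y)) := by
          simp [wordIdRuns]
        rw [hg, ih ys hlen y 0, hw, map_cast_eq_zero_add, range_map_shift]
        simp

lemma gRun_none (xs : List Int) : gRun none (-1) xs = wordIdRuns xs := by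
  cases xs with
  | nil => simp [gRun, wordIdRuns]
  | cons x rest =>
    have hg : gRun none (-1) (x :: rest) = 0 :: gRun (some x) 0 rest := by
      simp [gRun]
    have hw : wordIdRuns (x :: rest) =
        (List.range (((rest.takeWhile (fun y => y == x)).length) + 1)).map (fun k : Nat => (k : Int))
          ++ wordIdRuns (rest.dropWhile (fun y => y == x)) := by
      simp [wordIdRuns]
    rw [hg, gRun_run rest.length rest le_rfl x 0, hw, map_cast_eq_zero_add, range_map_shift]
    simp

-- ===== VERDICT (by name: the statement is the Claim_ definition above) =====
theorem word_id_gen_spec : Claim_equal_word_id_gen := by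
  intro xs _
  show word_id_gen xs = word_id_gen_alt xs
  unfold word_id_gen word_id_gen_alt
  rw [foldA_eq_gRun xs none (-1) []]
  simpa using gRun_none xs
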